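-- pv_equiv track=rewrite | github.com/rendello/layout | scripts/layout.py | layout_html
-- ===== SOURCE A (Python) =====
-- def get_key_ids(layout):
-- 	key_ids = {}
-- 	key_index = 0
--
-- 	for row in layout:
-- 		for item in row:
-- 			if isinstance(item, list):
-- 				for key_name in item:
-- 					if key_name not in key_ids:
-- 						key_ids[key_name] = f"key_{key_index}"
-- 						key_index += 1
-- 	return key_ids
--
-- def layout_html(layout, css_class_map):
-- 	key_ids = get_key_ids(layout)
-- 	s = ""
--
-- 	for k, v in key_ids.items():
-- 		if k in css_class_map:
-- 			css_classes = css_class_map[k]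
-- 		else:
-- 			css_classes = ["button"]
--
-- 		s += f"""<div style="grid-area: {v};" class="{" ".join([c for c in css_classes]).strip()}">{k}</div>\n"""
--
-- 	return s.strip()
-- ===== SOURCE B (Python) =====
-- def layout_html(layout, css_class_map):
--     parts = []
--     seen = set()
--     index = 0
--     for row in layout:
--         for item in row:
--             if isinstance(item, list):
--                 for key_name in item:
--                     if key_name not in seen:
--                         seen.add(key_name)
--                         css = css_class_map[key_name] if key_name in css_class_map else ["button"]
--                         parts.append(
--                             f"""<div style="grid-area: key_{index};" class="{" ".join(css).strip()}">{key_name}</div>"""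
--                         )
--                         index += 1
--     return "\n".join(parts)
-- ===== Notes on version B (the rewrite author's own statement) =====
-- stated objective: simpler
-- what changed: B fuses A's two passes (build a key->id dict, then iterate dict items appending to a string and strip) into one traversal of the layout that, on first sight of a key (tracked by a set and a running index), renders its div immediately into a list joined with '\n' at the end; no id dict and no final strip.
import Mathlib
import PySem

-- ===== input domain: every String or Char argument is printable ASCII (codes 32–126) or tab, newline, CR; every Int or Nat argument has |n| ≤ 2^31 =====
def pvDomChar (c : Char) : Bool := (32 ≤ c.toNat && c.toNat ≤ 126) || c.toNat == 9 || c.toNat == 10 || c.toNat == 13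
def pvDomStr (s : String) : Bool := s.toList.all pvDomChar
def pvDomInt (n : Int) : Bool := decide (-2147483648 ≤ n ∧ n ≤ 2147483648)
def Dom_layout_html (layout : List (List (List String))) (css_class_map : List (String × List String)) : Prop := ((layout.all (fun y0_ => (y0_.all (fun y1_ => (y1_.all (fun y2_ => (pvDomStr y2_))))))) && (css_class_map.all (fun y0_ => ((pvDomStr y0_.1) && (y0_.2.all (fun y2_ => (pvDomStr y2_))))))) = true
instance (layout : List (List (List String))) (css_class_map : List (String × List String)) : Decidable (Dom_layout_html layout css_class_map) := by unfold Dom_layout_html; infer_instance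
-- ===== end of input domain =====

-- B inlines the id-assignment pass into the html pass (one fused traversal with a seen-set and a
-- running index, collecting div strings into a list joined with "\n") instead of A's two passes
-- (dict of ids first, then string += over dict items, then strip); objective: simpler/idiomatic.

-- ===== PORT A =====
-- helper get_key_ids: the (key_ids, key_index) state threaded through the three nested loops
def gki_step (st : PySem.Dict String String × Int) (key_name : String) :
    PySem.Dict String String × Int :=
  if st.1.contains key_name then st
  else (st.1.insert key_name ("key_" ++ PySem.Int.toStr st.2), st.2 + 1)

def get_key_ids (layout : List (List (List String))) : PySem.Dict String String :=
  (layout.foldl (fun st row => row.foldl (fun st item => item.foldl gki_step st) st)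
    (PySem.Dict.empty, 0)).1

-- the body of A's loop over key_ids.items(): the css lookup and the f-string line (ends with "\n")
def a_div (css_class_map : List (String × List String)) (k v : String) : String :=
  let css_classes :=
    if (PySem.Dict.ofList css_class_map).contains k then
      ((PySem.Dict.ofList css_class_map).get? k).getD ["button"]
    else ["button"]
  "<div style=\"grid-area: " ++ v ++ ";\" class=\"" ++
    PySem.Str.strip (PySem.Str.join " " (css_classes.map (fun c => c))) ++ "\">" ++ k ++ "</div>\n"

def layout_html (layout : List (List (List String))) (css_class_map : List (String × List String)) : String :=
  let key_ids := get_key_ids layout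
  let s := key_ids.items.foldl (fun s kv => s ++ a_div css_class_map kv.1 kv.2) ""
  PySem.Str.strip s

-- ===== PORT B =====
-- the f-string part for a newly seen key (no trailing "\n"; the id "key_{index}" is built inline)
def b_div (css_class_map : List (String × List String)) (key_name : String) (index : Int) : String :=
  let css :=
    if (PySem.Dict.ofList css_class_map).contains key_name then
      ((PySem.Dict.ofList css_class_map).get? key_name).getD ["button"]
    else ["button"]
  "<div style=\"grid-area: key_" ++ PySem.Int.toStr index ++ ";\" class=\"" ++
    PySem.Str.strip (PySem.Str.join " " css) ++ "\">" ++ key_name ++ "</div>"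

-- state (seen, index, parts) of B's single fused pass
def b_step (css_class_map : List (String × List String))
    (st : PySem.Set String × Int × List String) (key_name : String) :
    PySem.Set String × Int × List String :=
  if PySem.Set.contains st.1 key_name then st
  else (PySem.Set.add st.1 key_name, st.2.1 + 1,
        st.2.2 ++ [b_div css_class_map key_name st.2.1])

def layout_html_alt (layout : List (List (List String))) (css_class_map : List (String × List String)) : String :=
  let st := layout.foldl
    (fun st row => row.foldl (fun st item => item.foldl (b_step css_class_map) st) st)
    ((PySem.Set.empty : PySem.Set String), (0 : Int), ([] : List String))
  PySem.Str.join "\n" st.2.2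

-- ===== PRECONDITION & SPEC =====
def Spec_layout_html (layout : List (List (List String))) (css_class_map : List (String × List String)) (out : String) : Prop := out = layout_html_alt layout css_class_map
instance (layout : List (List (List String))) (css_class_map : List (String × List String)) (out : String) : Decidable (Spec_layout_html layout css_class_map out) := by unfold Spec_layout_html; infer_instance

-- ===== CLAIM (what is proved, stated in full; the proofs are below) =====
def Claim_equal_layout_html : Prop := ∀ (layout : List (List (List String))) (css_class_map : List (String × List String)), Dom_layout_html layout css_class_map → Spec_layout_html layout css_class_map (layout_html layout css_class_map)

-- ===== LEMMAS AND PROOFS =====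

-- the common rendered div (no trailing newline), as a function of the key and its id string
def pvRender (css_class_map : List (String × List String)) (k v : String) : String :=
  let css :=
    if (PySem.Dict.ofList css_class_map).contains k then
      ((PySem.Dict.ofList css_class_map).get? k).getD ["button"]
    else ["button"]
  "<div style=\"grid-area: " ++ v ++ ";\" class=\"" ++
    PySem.Str.strip (PySem.Str.join " " css) ++ "\">" ++ k ++ "</div>"

theorem a_div_eq (ccm : List (String × List String)) (k v : String) :
    a_div ccm k v = pvRender ccm k v ++ "\n" := by
  simp only [a_div, pvRender, List.map_id', String.append_assoc]; rfl

theorem b_div_eq (ccm : List (String × List String)) (k : String) (i : Int) :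
    b_div ccm k i = pvRender ccm k ("key_" ++ PySem.Int.toStr i) := by
  have h : ("<div style=\"grid-area: " ++ "key_" : String) = "<div style=\"grid-area: key_" := rfl
  simp only [b_div, pvRender, String.append_assoc, ← h]

-- the invariant tying A's (dict, index) state to B's (seen, index, parts) state
def pvInv (ccm : List (String × List String))
    (a : PySem.Dict String String × Int)
    (b : PySem.Set String × Int × List String) : Prop :=
  b.1 = a.1.items.map Prod.fst ∧ b.2.1 = a.2 ∧
  b.2.2 = a.1.items.map (fun kv => pvRender ccm kv.1 kv.2)

theorem pvInv_step (ccm : List (String × List String)) (a : PySem.Dict String String × Int)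
    (b : PySem.Set String × Int × List String) (n : String) (h : pvInv ccm a b) :
    pvInv ccm (gki_step a n) (b_step ccm b n) := by
  obtain ⟨h1, h2, h3⟩ := h
  have hnm' : n ∉ List.map Prod.fst a.1.items → a.1.contains n = false := by
    intro hmem
    simp only [PySem.Dict.contains, List.any_eq_false]
    intro p hp
    by_contra hq
    simp only [beq_iff_eq] at hq
    exact hmem (List.mem_map.2 ⟨p, hp, hq⟩)
  have hc : PySem.Set.contains b.1 n = a.1.contains n := by
    rw [h1]
    by_cases hm : n ∈ List.map Prod.fst a.1.items
    · obtain ⟨p, hp, hpe⟩ := List.mem_map.1 hm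
      have r : a.1.contains n = true := by
        simp only [PySem.Dict.contains, List.any_eq_true]
        exact ⟨p, hp, by simp [hpe]⟩
      simp [PySem.Set.contains, hm, r]
    · simp [PySem.Set.contains, hm, hnm' hm]
  unfold gki_step b_step
  rw [hc]
  by_cases hca : a.1.contains n
  · simp only [hca, if_true]; exact ⟨h1, h2, h3⟩
  · have hmem : n ∉ List.map Prod.fst a.1.items := by
      intro hmem
      obtain ⟨p, hp, hpe⟩ := List.mem_map.1 hmem
      exact hca (List.any_eq_true.2 ⟨p, hp, by simp [hpe]⟩)
    have hnb : n ∉ b.1 := by rw [h1]; exact hmem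
    simp only [hca, Bool.false_eq_true, if_false]
    have hfresh : a.1.insert n ("key_" ++ PySem.Int.toStr a.2) =
        PySem.Dict.mk (a.1.items ++ [(n, "key_" ++ PySem.Int.toStr a.2)]) := by
      simp [PySem.Dict.insert, hca]
    refine ⟨?_, ?_, ?_⟩
    · rw [PySem.Set.add_of_not_mem hnb, hfresh, h1]; simp
    · simp [h2]
    · rw [hfresh]
      simp only [List.map_append, List.map_cons, List.map_nil]
      rw [h3, h2, b_div_eq]

theorem pv_foldl_rel {α β γ : Type} (R : α → β → Prop) (f : α → γ → α) (g : β → γ → β)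
    (h : ∀ a b c, R a b → R (f a c) (g b c)) :
    ∀ (l : List γ) (a : α) (b : β), R a b → R (l.foldl f a) (l.foldl g b) := by
  intro l
  induction l with
  | nil => intro a b hr; exact hr
  | cons x xs ih => intro a b hr; exact ih _ _ (h a b x hr)

theorem pvInv_final (layout : List (List (List String))) (ccm : List (String × List String)) :
    pvInv ccm
      (layout.foldl (fun st row => row.foldl (fun st item => item.foldl gki_step st) st)
        (PySem.Dict.empty, 0))
      (layout.foldl
        (fun st row => row.foldl (fun st item => item.foldl (b_step ccm) st) st)
        ((PySem.Set.empty : PySem.Set String), (0 : Int), ([] : List String))) := by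
  refine pv_foldl_rel (pvInv ccm) _ _ ?_ layout _ _ ?_
  · intro a b row hr
    refine pv_foldl_rel (pvInv ccm) _ _ ?_ row a b hr
    intro a b item hr
    exact pv_foldl_rel (pvInv ccm) _ _ (fun a b n hr => pvInv_step ccm a b n hr) item a b hr
  · exact ⟨rfl, rfl, rfl⟩

-- string side: A's strip(Σ parts·"\n") equals B's "\n".join(parts)
theorem pv_foldl_toList {γ : Type} (F : γ → String) :
    ∀ (l : List γ) (s0 : String),
      (l.foldl (fun s kv => s ++ F kv) s0).toList
        = s0.toList ++ (l.map (fun kv => (F kv).toList)).flatten := by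
  intro l
  induction l with
  | nil => intro s0; simp
  | cons x xs ih => intro s0; simp [ih, String.toList_append]

theorem pv_rstrip_append_gt (p : List Char) (hlast : p.getLast? = some '>') :
    PySem.Chars.rstrip (p ++ ['\n']) = p := by
  unfold PySem.Chars.rstrip
  rw [List.reverse_append]
  have h1 : (['\n'] : List Char).reverse = ['\n'] := rfl
  rw [h1]
  have h2 : List.dropWhile PySem.Chars.isspace ('\n' :: p.reverse)
      = List.dropWhile PySem.Chars.isspace p.reverse := by
    rw [List.dropWhile_cons_of_pos]; rfl
  rw [List.cons_append, List.nil_append] at *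
  rw [h2]
  have h3 : p.reverse.head? = some '>' := by rw [List.head?_reverse]; exact hlast
  cases hr : p.reverse with
  | nil => rw [hr] at h3; simp at h3
  | cons x t =>
    rw [hr] at h3; simp at h3
    rw [List.dropWhile_cons_of_neg (by rw [h3]; decide)]
    rw [← hr, List.reverse_reverse]

theorem pv_rstrip_append_left (a b : List Char) (hb : PySem.Chars.rstrip b ≠ []) :
    PySem.Chars.rstrip (a ++ b) = a ++ PySem.Chars.rstrip b := by
  unfold PySem.Chars.rstrip at *
  rw [List.reverse_append, List.dropWhile_append]
  have : (List.dropWhile PySem.Chars.isspace b.reverse).isEmpty = false := by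
    rw [List.isEmpty_eq_false_iff]
    intro h; rw [h] at hb; exact hb rfl
  rw [this]
  simp

theorem pv_join_cons_ne_nil (q : List Char) (tl : List (List Char)) (hq : q ≠ []) :
    PySem.Chars.join ['\n'] (q :: tl) ≠ [] := by
  cases tl with
  | nil => simpa [PySem.Chars.join, List.intercalate] using hq
  | cons r tl2 =>
    have : PySem.Chars.join ['\n'] (q :: r :: tl2)
        = q ++ ['\n'] ++ PySem.Chars.join ['\n'] (r :: tl2) := by
      simp [PySem.Chars.join, List.intercalate, List.intersperse]
    rw [this]
    simp [hq]

theorem pv_rstrip_flatten (ps : List (List Char))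
    (h : ∀ p ∈ ps, p.head? = some '<' ∧ p.getLast? = some '>') :
    PySem.Chars.rstrip ((ps.map (· ++ ['\n'])).flatten) = PySem.Chars.join ['\n'] ps := by
  induction ps with
  | nil => rfl
  | cons p tl ih =>
    have hp := h p (List.mem_cons_self ..)
    cases tl with
    | nil =>
      simp only [List.map_cons, List.map_nil, List.flatten_cons, List.flatten_nil, List.append_nil]
      rw [pv_rstrip_append_gt p hp.2]
      simp [PySem.Chars.join, List.intercalate]
    | cons q tl2 =>
      have hq := h q (by simp)
      have hqne : q ≠ [] := by intro hqq; rw [hqq] at hq; simp at hq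
      have ih' := ih (fun r hr => h r (List.mem_cons_of_mem _ hr))
      simp only [List.map_cons, List.flatten_cons] at *
      have hb : PySem.Chars.rstrip (q ++ ['\n'] ++ (List.map (fun x => x ++ ['\n']) tl2).flatten) ≠ [] := by
        rw [ih']; exact pv_join_cons_ne_nil q tl2 hqne
      rw [pv_rstrip_append_left _ _ hb, ih']
      have hjoin : PySem.Chars.join ['\n'] (p :: q :: tl2)
          = p ++ ['\n'] ++ PySem.Chars.join ['\n'] (q :: tl2) := by
        simp [PySem.Chars.join, List.intercalate, List.intersperse]
      rw [hjoin, List.append_assoc]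

theorem pv_strip_flatten (ps : List (List Char))
    (h : ∀ p ∈ ps, p.head? = some '<' ∧ p.getLast? = some '>') :
    PySem.Chars.strip ((ps.map (· ++ ['\n'])).flatten) = PySem.Chars.join ['\n'] ps := by
  cases ps with
  | nil => rfl
  | cons p tl =>
    have hp := h p (List.mem_cons_self ..)
    unfold PySem.Chars.strip
    have hl : PySem.Chars.lstrip (((p :: tl).map (· ++ ['\n'])).flatten)
        = ((p :: tl).map (· ++ ['\n'])).flatten := by
      cases p with
      | nil => simp at hp
      | cons x t =>
        have hx : x = '<' := by simpa using hp.1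
        simp only [List.map_cons, List.flatten_cons, List.cons_append, List.append_assoc]
        unfold PySem.Chars.lstrip
        rw [List.dropWhile_cons_of_neg (by rw [hx]; decide)]
    rw [hl]
    exact pv_rstrip_flatten (p :: tl) h

theorem pvRender_shape (ccm : List (String × List String)) (k v : String) :
    ((pvRender ccm k v).toList).head? = some '<' ∧
      ((pvRender ccm k v).toList).getLast? = some '>' := by
  unfold pvRender
  constructor
  · simp only [String.toList_append]
    rw [show ("<div style=\"grid-area: " : String).toList
        = '<' :: ("div style=\"grid-area: " : String).toList from rfl]
    simp only [List.cons_append, List.head?_cons]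
  · rw [String.toList_append, List.getLast?_append_of_ne_nil] <;> simp

theorem pv_final_string (ccm : List (String × List String)) (l : List (String × String)) :
    PySem.Str.strip (l.foldl (fun s kv => s ++ a_div ccm kv.1 kv.2) "")
      = PySem.Str.join "\n" (l.map (fun kv => pvRender ccm kv.1 kv.2)) := by
  have hmap : (l.map (fun kv => (a_div ccm kv.1 kv.2).toList))
      = (l.map (fun kv => (pvRender ccm kv.1 kv.2).toList)).map (· ++ ['\n']) := by
    rw [List.map_map]
    apply List.map_congr_left
    intro kv _
    simp [a_div_eq, String.toList_append]
  simp only [PySem.Str.strip, PySem.Str.join]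
  rw [pv_foldl_toList, hmap]
  have h0 : String.toList "" = [] := rfl
  rw [h0, List.nil_append]
  rw [pv_strip_flatten _ (by
    intro p hpmem
    obtain ⟨kv, _, rfl⟩ := List.mem_map.1 hpmem
    exact pvRender_shape ccm kv.1 kv.2)]
  rw [List.map_map]
  rfl

-- ===== VERDICT (by name: the statement is the Claim_ definition above) =====
theorem layout_html_spec : Claim_equal_layout_html := by
  intro layout ccm _
  unfold Spec_layout_html layout_html layout_html_alt get_key_ids
  dsimp only
  obtain ⟨h1, h2, h3⟩ := pvInv_final layout ccm
  rw [h3, pv_final_string]
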